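-- pv_equiv track=rewrite | github.com/Alexandorel/Prelucrarea-Imaginilor | app.py | calculate_projections
-- ===== SOURCE A (Python) =====
-- def calculate_projections(matrix):
--     height = len(matrix)
--     width = len(matrix[0])
--
--     proj_H = [0] * height
--     for i in range(height):
--         for j in range(width):
--             r, g, b = matrix[i][j]
--             gray = (r + g + b) // 3
--             proj_H[i] += gray
--
--     proj_V = [0] * width
--     for i in range(height):
--         for j in range(width):
--             r, g, b = matrix[i][j]
--             gray = (r + g + b) // 3
--             proj_V[j] += gray
--
--     return proj_H, proj_V
-- ===== SOURCE B (Python) =====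
-- def calculate_projections(matrix):
--     width = len(matrix[0])
--     proj_H = []
--     proj_V = [0] * width
--     for row in matrix:
--         row_sum = 0
--         for j in range(width):
--             r, g, b = row[j]
--             gray = (r + g + b) // 3
--             row_sum += gray
--             proj_V[j] += gray
--         proj_H.append(row_sum)
--     return proj_H, proj_V
-- ===== Notes on version B (the rewrite author's own statement) =====
-- stated objective: simpler
-- what changed: Replaces A's two separate nested index loops (computing each pixel's gray twice) with a single pass over the rows that computes gray once per pixel, accumulating a per-row sum for proj_H and updating the running column vector proj_V.
import Mathlib
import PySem

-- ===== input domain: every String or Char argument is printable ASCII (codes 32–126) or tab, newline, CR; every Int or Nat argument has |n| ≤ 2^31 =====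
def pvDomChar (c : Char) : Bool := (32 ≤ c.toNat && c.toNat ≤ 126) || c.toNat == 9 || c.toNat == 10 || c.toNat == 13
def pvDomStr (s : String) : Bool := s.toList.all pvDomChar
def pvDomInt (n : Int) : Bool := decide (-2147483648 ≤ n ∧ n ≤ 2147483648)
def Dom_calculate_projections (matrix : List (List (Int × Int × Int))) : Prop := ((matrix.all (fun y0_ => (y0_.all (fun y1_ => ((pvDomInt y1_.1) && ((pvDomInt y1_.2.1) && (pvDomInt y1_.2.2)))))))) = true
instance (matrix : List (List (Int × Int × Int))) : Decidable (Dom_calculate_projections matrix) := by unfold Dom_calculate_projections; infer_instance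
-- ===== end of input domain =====

-- B is a single pass computing each pixel's gray once, with a per-row sum for proj_H and a
-- running column vector for proj_V; A makes two separate nested passes. Return values proved equal.

-- ===== PORT A =====
def calculate_projections (matrix : List (List (Int × Int × Int))) : List Int × List Int :=
  let height : Int := matrix.length
  let width : Int := (PySem.List.pyGetD matrix 0 []).length
  let projH := (PySem.List.pyRange 0 height 1).foldl (fun pH i =>
      (PySem.List.pyRange 0 width 1).foldl (fun pH j =>
        let rgb := PySem.List.pyGetD (PySem.List.pyGetD matrix i []) j (0, 0, 0)
        let gray := PySem.Int.floordiv (rgb.1 + rgb.2.1 + rgb.2.2) 3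
        PySem.List.pySetD pH i (PySem.List.pyGetD pH i 0 + gray)) pH)
    (List.replicate height.toNat 0)
  let projV := (PySem.List.pyRange 0 height 1).foldl (fun pV i =>
      (PySem.List.pyRange 0 width 1).foldl (fun pV j =>
        let rgb := PySem.List.pyGetD (PySem.List.pyGetD matrix i []) j (0, 0, 0)
        let gray := PySem.Int.floordiv (rgb.1 + rgb.2.1 + rgb.2.2) 3
        PySem.List.pySetD pV j (PySem.List.pyGetD pV j 0 + gray)) pV)
    (List.replicate width.toNat 0)
  (projH, projV)

-- ===== PORT B =====
def calculate_projections_alt (matrix : List (List (Int × Int × Int))) : List Int × List Int :=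
  let width : Int := (PySem.List.pyGetD matrix 0 []).length
  matrix.foldl (fun (acc : List Int × List Int) row =>
      let inner := (PySem.List.pyRange 0 width 1).foldl (fun (sp : Int × List Int) j =>
          let rgb := PySem.List.pyGetD row j (0, 0, 0)
          let gray := PySem.Int.floordiv (rgb.1 + rgb.2.1 + rgb.2.2) 3
          (sp.1 + gray, PySem.List.pySetD sp.2 j (PySem.List.pyGetD sp.2 j 0 + gray)))
        (0, acc.2)
      (acc.1 ++ [inner.1], inner.2))
    ([], List.replicate width.toNat 0)

-- ===== PRECONDITION & SPEC =====
-- Pre_ excludes exactly the inputs where Python A raises IndexError: the empty matrix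
-- (matrix[0]) and matrices with a row shorter than the first row (matrix[i][j]).
def Pre_calculate_projections (matrix : List (List (Int × Int × Int))) : Prop :=
  matrix ≠ [] ∧ ∀ row ∈ matrix, (matrix.headD []).length ≤ row.length

instance (matrix : List (List (Int × Int × Int))) : Decidable (Pre_calculate_projections matrix) := by
  unfold Pre_calculate_projections; infer_instance

def pvWitness_calculate_projections : (List (List (Int × Int × Int))) :=
  [[(1, 2, 3), (4, 5, 6)], [(7, 8, 9), (10, 11, 12)]]

def Spec_calculate_projections (matrix : List (List (Int × Int × Int))) (out : List Int × List Int) : Prop := out = calculate_projections_alt matrix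
instance (matrix : List (List (Int × Int × Int))) (out : List Int × List Int) : Decidable (Spec_calculate_projections matrix out) := by unfold Spec_calculate_projections; infer_instance

-- ===== CLAIM (what is proved, stated in full; the proofs are below) =====
def Claim_equal_calculate_projections : Prop := ∀ (matrix : List (List (Int × Int × Int))), Dom_calculate_projections matrix → Pre_calculate_projections matrix → Spec_calculate_projections matrix (calculate_projections matrix)

-- ===== LEMMAS AND PROOFS =====

-- helper value-forms used only by the proofs
def pvGray (row : List (Int × Int × Int)) (j : Nat) : Int :=
  let rgb := row.getD j (0, 0, 0)
  PySem.Int.floordiv (rgb.1 + rgb.2.1 + rgb.2.2) 3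

def pvRowSum (w : Nat) (row : List (Int × Int × Int)) : Int :=
  (List.range w).foldl (fun s j => s + pvGray row j) 0

def pvColStep (w : Nat) (pV : List Int) (row : List (Int × Int × Int)) : List Int :=
  (List.range w).foldl (fun pV j => pV.set j (pV.getD j 0 + pvGray row j)) pV

@[simp] theorem pvSetD_natCast (xs : List Int) (n : Nat) (v : Int) :
    PySem.List.pySetD xs (n : Int) v = xs.set n v := by
  by_cases h : n < xs.length
  · simp [PySem.List.pySetD, PySem.List.pySet?_natCast xs n v h]
  · have h1 : PySem.List.pySet? xs (n : Int) v = none := by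
      rw [PySem.List.pySet?_eq_none_iff]
      simp [PySem.Raise.InRange]; omega
    simp [PySem.List.pySetD, h1, List.set_eq_of_length_le (by omega : xs.length ≤ n)]

theorem pvRangeFoldNorm {σ : Type} (b : Nat) (f : σ → Int → σ) (init : σ) :
    (PySem.List.pyRange 0 (b : Int) 1).foldl f init
      = (List.range b).foldl (fun s (k : Nat) => f s (k : Int)) init := by
  rw [PySem.List.pyRange_one, List.foldl_map]
  norm_num

theorem pvSumShift (js : List Nat) (g : Nat → Int) (a b : Int) :
    js.foldl (fun s j => s + g j) (a + b) = a + js.foldl (fun s j => s + g j) b := by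
  induction js generalizing b with
  | nil => simp
  | cons j js ih => simp only [List.foldl_cons, add_assoc, ih]

theorem pvCollapse (js : List Nat) (i : Nat) (g : Nat → Int) (pH : List Int) :
    js.foldl (fun pH j => pH.set i (pH.getD i 0 + g j)) pH
      = pH.set i (pH.getD i 0 + js.foldl (fun s j => s + g j) 0) := by
  induction js generalizing pH with
  | nil =>
    simp only [List.foldl_nil, add_zero]
    by_cases h : i < pH.length
    · rw [List.getD_eq_getElem _ _ h, List.set_getElem_self h]
    · rw [List.set_eq_of_length_le (by omega : pH.length ≤ i)]
  | cons j js ih =>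
    simp only [List.foldl_cons]
    rw [ih]
    by_cases h : i < pH.length
    · rw [List.set_set]
      have hgd : (pH.set i (pH.getD i 0 + g j)).getD i 0 = pH.getD i 0 + g j := by
        rw [List.getD_eq_getElem _ _ (by simpa using h), List.getElem_set_self]
      rw [hgd]
      have hs : js.foldl (fun s j => s + g j) (0 + g j)
          = g j + js.foldl (fun s j => s + g j) 0 := by
        simpa [add_comm] using pvSumShift js g (g j) 0
      rw [hs, add_assoc]
    · have hle : pH.length ≤ i := by omega
      simp [List.set_eq_of_length_le hle]

theorem pvFoldProdSplit {α β γ : Type} (js : List γ) (f : α → γ → α) (h : β → γ → β)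
    (a : α) (b : β) :
    js.foldl (fun sp j => (f sp.1 j, h sp.2 j)) (a, b) = (js.foldl f a, js.foldl h b) := by
  induction js generalizing a b with
  | nil => rfl
  | cons j js ih => simp [List.foldl_cons, ih]

theorem pvFoldAppendMap {α : Type} (l : List α) (f : α → Int) (init : List Int) :
    l.foldl (fun acc x => acc ++ [f x]) init = init ++ l.map f := by
  induction l generalizing init with
  | nil => simp
  | cons x l ih => simp [List.foldl_cons, ih]

theorem pvRangeFoldGetD {α σ : Type} (l : List α) (f : σ → α → σ) (d : α) (init : σ) :
    (List.range l.length).foldl (fun s i => f s (l.getD i d)) init = l.foldl f init := by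
  induction l generalizing init with
  | nil => simp
  | cons x l ih =>
    rw [List.length_cons, List.range_succ_eq_map]
    simp only [List.foldl_cons, List.foldl_map, List.getD_cons_zero, List.getD_cons_succ]
    exact ih _

theorem pvRangeMapGetD {α β : Type} (l : List α) (f : α → β) (d : α) :
    (List.range l.length).map (fun i => f (l.getD i d)) = l.map f := by
  induction l with
  | nil => simp
  | cons x l ih =>
    rw [List.length_cons, List.range_succ_eq_map]
    simp only [List.map_cons, List.map_map, Function.comp_def, List.getD_cons_zero,
      List.getD_cons_succ]
    exact congrArg _ ih

theorem pvSetFoldRange' (S : Nat → Int) :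
    ∀ (n k : Nat) (pH : List Int), pH.length = k + n →
    (List.range' k n).foldl (fun pH i => pH.set i (pH.getD i 0 + S i)) pH
      = pH.take k ++ (List.range' k n).map (fun i => pH.getD i 0 + S i) := by
  intro n
  induction n with
  | zero =>
    intro k pH hlen
    simp [List.take_of_length_le (by omega : pH.length ≤ k)]
  | succ n ih =>
    intro k pH hlen
    rw [List.range'_succ]
    simp only [List.foldl_cons, List.map_cons]
    have hk : k < pH.length := by omega
    set v : Int := pH.getD k 0 + S k with hv
    have hlen1 : (pH.set k v).length = (k + 1) + n := by simp; omega
    rw [ih (k + 1) (pH.set k v) hlen1]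
    have htake : (pH.set k v).take (k + 1) = pH.take k ++ [v] := by
      rw [List.set_eq_take_append_cons_drop, if_pos hk]
      have hlt : (pH.take k).length = k := by simp; omega
      rw [List.take_append, hlt]
      have h1 : (pH.take k).take (k + 1) = pH.take k :=
        List.take_of_length_le (by omega)
      simp [h1]
    rw [htake, List.append_assoc]
    congr 1
    simp only [List.singleton_append]
    congr 1
    apply List.map_congr_left
    intro i hi
    have hi' : k + 1 ≤ i := (List.mem_range'_1.mp hi).1
    have hne : k ≠ i := by omega
    congr 1
    rw [List.getD_eq_getElem?_getD, List.getD_eq_getElem?_getD, List.getElem?_set_ne hne]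

theorem pvSetFoldRange (S : Nat → Int) (h : Nat) :
    (List.range h).foldl (fun pH i => pH.set i (pH.getD i 0 + S i)) (List.replicate h 0)
      = (List.range h).map S := by
  rw [List.range_eq_range', pvSetFoldRange' S h 0 (List.replicate h 0) (by simp)]
  simp only [List.take_zero, List.nil_append]
  apply List.map_congr_left
  intro i hi
  have hih : i < h := by simpa [List.mem_range'_1] using hi
  simp [List.getD_eq_getElem?_getD, hih]

-- normal forms of the two ports
theorem pvGrayEq (row : List (Int × Int × Int)) (j : Nat) :
    PySem.Int.floordiv ((row.getD j (0, 0, 0)).1 + (row.getD j (0, 0, 0)).2.1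
      + (row.getD j (0, 0, 0)).2.2) 3 = pvGray row j := rfl

theorem pvPortA_norm (matrix : List (List (Int × Int × Int))) :
    calculate_projections matrix =
      (matrix.map (pvRowSum (matrix.getD 0 []).length),
       matrix.foldl (pvColStep (matrix.getD 0 []).length) (List.replicate (matrix.getD 0 []).length 0)) := by
  unfold calculate_projections
  simp only [PySem.List.pyGetD_zero, pvRangeFoldNorm, PySem.List.pyGetD_natCast,
    pvSetD_natCast, Int.toNat_natCast, pvGrayEq]
  rw [Prod.mk.injEq]
  constructor
  · rw [PySem.List.foldl_congr_mem (List.range matrix.length) _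
      (fun (pH : List Int) (i : Nat) =>
        pH.set i (pH.getD i 0 + pvRowSum (matrix.getD 0 []).length (matrix.getD i [])))
      (List.replicate matrix.length 0)
      (fun pH i _ => pvCollapse (List.range (matrix.getD 0 []).length) i
        (pvGray (matrix.getD i [])) pH)]
    rw [pvSetFoldRange (fun i => pvRowSum (matrix.getD 0 []).length (matrix.getD i []))]
    exact pvRangeMapGetD matrix (pvRowSum (matrix.getD 0 []).length) []
  · exact pvRangeFoldGetD matrix (pvColStep (matrix.getD 0 []).length) [] _

theorem pvPortB_norm (matrix : List (List (Int × Int × Int))) :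
    calculate_projections_alt matrix =
      (matrix.map (pvRowSum (matrix.getD 0 []).length),
       matrix.foldl (pvColStep (matrix.getD 0 []).length) (List.replicate (matrix.getD 0 []).length 0)) := by
  unfold calculate_projections_alt
  simp only [PySem.List.pyGetD_zero, pvRangeFoldNorm, PySem.List.pyGetD_natCast,
    pvSetD_natCast, Int.toNat_natCast, pvGrayEq]
  rw [PySem.List.foldl_congr_mem matrix _
    (fun (acc : List Int × List Int) row =>
      (acc.1 ++ [pvRowSum (matrix.getD 0 []).length row],
       pvColStep (matrix.getD 0 []).length acc.2 row))
    (([] : List Int), List.replicate (matrix.getD 0 []).length 0)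
    (fun acc row _ => by
      rw [pvFoldProdSplit (List.range (matrix.getD 0 []).length)
        (fun (s : Int) (j : Nat) => s + pvGray row j)
        (fun (pV : List Int) (j : Nat) => pV.set j (pV.getD j 0 + pvGray row j)) 0 acc.2]
      rfl)]
  rw [pvFoldProdSplit matrix
    (fun (acc1 : List Int) row => acc1 ++ [pvRowSum (matrix.getD 0 []).length row])
    (pvColStep (matrix.getD 0 []).length) [] (List.replicate (matrix.getD 0 []).length 0)]
  rw [pvFoldAppendMap]
  simp

-- ===== VERDICT (by name: the statement is the Claim_ definition above) =====
theorem calculate_projections_spec : Claim_equal_calculate_projections := by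
  intro matrix _ _
  unfold Spec_calculate_projections
  rw [pvPortA_norm, pvPortB_norm]
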